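-- pv_equiv track=rewrite | github.com/RoacherM/leetcodes | 滑动窗口/最大连续1的个数.py | MergeOnes
-- ===== SOURCE A (Python) =====
-- def MergeOnes(nums):
--     merge = []
--     prevs = 0
--     for num in nums:
--         if num:
--             prevs += num
--         else:
--             if prevs:
--                 merge.append(prevs)
--                 prevs = 0
--             merge.append(num)
--     if prevs:
--         merge.append(prevs)
--     return merge
-- ===== SOURCE B (Python) =====
-- def MergeOnes(nums):
--     out = []
--     i, n = 0, len(nums)
--     while i < n:
--         if nums[i]:
--             j = i
--             s = 0
--             while j < n and nums[j]:
--                 s += nums[j]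
--                 j += 1
--             if s:
--                 out.append(s)
--             i = j
--         else:
--             j = i
--             while j < n and not nums[j]:
--                 j += 1
--             out.extend(nums[i:j])
--             i = j
--     return out
-- ===== Notes on version B (the rewrite author's own statement) =====
-- stated objective: alternative
-- what changed: Replaces A's single element-wise pass with a pending-sum accumulator and flush logic by a run-based two-pointer scan: each maximal nonzero run is located, summed and emitted at once (if its sum is nonzero), and each maximal zero run is copied through as a slice.
import Mathlib
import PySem

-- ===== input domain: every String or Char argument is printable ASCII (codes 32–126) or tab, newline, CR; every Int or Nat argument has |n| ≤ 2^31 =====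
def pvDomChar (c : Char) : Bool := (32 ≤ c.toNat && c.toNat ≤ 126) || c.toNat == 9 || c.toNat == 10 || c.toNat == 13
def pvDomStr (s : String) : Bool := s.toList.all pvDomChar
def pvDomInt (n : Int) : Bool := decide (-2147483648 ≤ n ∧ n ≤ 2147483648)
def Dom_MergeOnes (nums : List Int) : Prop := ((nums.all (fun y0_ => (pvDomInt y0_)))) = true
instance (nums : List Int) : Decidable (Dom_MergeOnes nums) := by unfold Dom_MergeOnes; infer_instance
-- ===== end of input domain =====

-- B replaces A's element-wise pass with pending-sum/flush state by a run-based two-pointer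
-- scan over maximal nonzero / zero runs (objective: alternative; same return value everywhere).


-- ===== PORT A =====
-- loop body of A: state = (merge, prevs)
def aStep (st : List Int × Int) (num : Int) : List Int × Int :=
  if num ≠ 0 then (st.1, st.2 + num)
  else if st.2 ≠ 0 then (st.1 ++ [st.2] ++ [num], 0)
  else (st.1 ++ [num], 0)

-- final flush after the loop
def aFin (st : List Int × Int) : List Int :=
  if st.2 ≠ 0 then st.1 ++ [st.2] else st.1

def MergeOnes (nums : List Int) : List Int :=
  aFin (nums.foldl aStep ([], 0))

-- ===== PORT B =====
-- Python truthiness of an int, and its negation (the two inner `while` guards)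
def pnz (a : Int) : Bool := a != 0
def pz (a : Int) : Bool := a == 0

-- two-pointer run scan: each inner `while` advancing j over a maximal run is a
-- takeWhile/dropWhile split; `nums[i:j]` for a zero run is that run itself.
def MergeOnes_alt : List Int → List Int
  | [] => []
  | x :: xs =>
    if pnz x then
      (if pnz ((x :: xs).takeWhile pnz).sum then [((x :: xs).takeWhile pnz).sum] else [])
        ++ MergeOnes_alt ((x :: xs).dropWhile pnz)
    else
      (x :: xs).takeWhile pz ++ MergeOnes_alt ((x :: xs).dropWhile pz)
  termination_by l => l.length
  decreasing_by
  · rw [List.dropWhile_cons, if_pos (by assumption)]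
    exact Nat.lt_succ_of_le (List.length_dropWhile_le _ _)
  · rw [List.dropWhile_cons]
    split
    · exact Nat.lt_succ_of_le (List.length_dropWhile_le _ _)
    · simp_all [pnz, pz]

-- ===== PRECONDITION & SPEC =====
def Spec_MergeOnes (nums : List Int) (out : List Int) : Prop := out = MergeOnes_alt nums
instance (nums : List Int) (out : List Int) : Decidable (Spec_MergeOnes nums out) := by unfold Spec_MergeOnes; infer_instance

-- ===== CLAIM (what is proved, stated in full; the proofs are below) =====
def Claim_equal_MergeOnes : Prop := ∀ (nums : List Int), Dom_MergeOnes nums → Spec_MergeOnes nums (MergeOnes nums)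

-- ===== LEMMAS AND PROOFS =====

theorem dropWhile_head_false {p : Int → Bool} {l d' : List Int} {y : Int}
    (h : l.dropWhile p = y :: d') : p y = false := by
  have := List.head?_dropWhile_not p l
  rw [h] at this
  simpa using this

theorem alt_nil : MergeOnes_alt [] = [] := by rw [MergeOnes_alt]

-- the accumulated output only grows: pull the prefix out of the fold
theorem aFold_shift (xs : List Int) (m : List Int) (p : Int) :
    xs.foldl aStep (m, p) =
      (m ++ (xs.foldl aStep ([], p)).1, (xs.foldl aStep ([], p)).2) := by
  induction xs generalizing m p with
  | nil => simp
  | cons x xs ih =>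
    simp only [List.foldl_cons]
    by_cases hx : x ≠ 0
    · rw [show aStep (m, p) x = (m, p + x) by simp [aStep, hx],
          show aStep (([] : List Int), p) x = ([], p + x) by simp [aStep, hx]]
      exact ih m (p + x)
    · rw [not_not] at hx; subst hx
      by_cases hp : p ≠ 0
      · rw [show aStep (m, p) 0 = (m ++ [p] ++ [0], 0) by simp [aStep, hp],
            show aStep (([] : List Int), p) 0 = ([] ++ [p] ++ [0], 0) by simp [aStep, hp]]
        rw [ih (m ++ [p] ++ [0]) 0, ih ([] ++ [p] ++ [0]) 0]
        simp
      · rw [not_not] at hp; subst hp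
        rw [show aStep (m, 0) 0 = (m ++ [0], 0) by simp [aStep],
            show aStep (([] : List Int), 0) 0 = ([] ++ [0], 0) by simp [aStep]]
        rw [ih (m ++ [0]) 0, ih ([] ++ [0]) 0]
        simp

-- a run of nonzero elements only accumulates into prevs
theorem aFold_nonzero_run (xs : List Int) (h : ∀ a ∈ xs, a ≠ 0) (m : List Int) (p : Int) :
    xs.foldl aStep (m, p) = (m, p + xs.sum) := by
  induction xs generalizing p with
  | nil => simp
  | cons x xs ih =>
    have hx : x ≠ 0 := h x (by simp)
    simp only [List.foldl_cons]
    rw [show aStep (m, p) x = (m, p + x) by simp [aStep, hx],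
        ih (fun a ha => h a (by simp [ha])) (p + x)]
    simp [List.sum_cons]; ring_nf

-- a run of zeros, entered with prevs = 0, is copied through one by one
theorem aFold_zero_run (xs : List Int) (h : ∀ a ∈ xs, a = 0) (m : List Int) :
    xs.foldl aStep (m, 0) = (m ++ xs, 0) := by
  induction xs generalizing m with
  | nil => simp
  | cons x xs ih =>
    have hx : x = 0 := h x (by simp)
    subst hx
    simp only [List.foldl_cons]
    rw [show aStep (m, 0) 0 = (m ++ [0], 0) by simp [aStep],
        ih (fun a ha => h a (by simp [ha])) (m ++ [0])]
    simp

theorem aFin_append (m m' : List Int) (p : Int) :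
    aFin (m ++ m', p) = m ++ aFin (m', p) := by
  unfold aFin; split <;> simp

-- main lemma, by strong induction on length, peeling one maximal run at a time
theorem merge_main : ∀ (n : ℕ) (nums : List Int), nums.length ≤ n →
    aFin (nums.foldl aStep ([], 0)) = MergeOnes_alt nums := by
  intro n
  induction n with
  | zero =>
    intro nums hlen
    have : nums = [] := List.eq_nil_of_length_eq_zero (Nat.le_zero.mp hlen)
    subst this; simp [aFin, MergeOnes_alt]
  | succ n ih =>
    intro nums hlen
    match nums with
    | [] => simp [aFin, MergeOnes_alt]
    | x :: xs =>
      simp only [List.length_cons, Nat.add_le_add_iff_right] at hlen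
      by_cases hx : x = 0
      · -- leading maximal zero run
        subst hx
        have hzsplit := (List.takeWhile_append_dropWhile (p := pz) (l := xs)).symm
        have hz'mem : ∀ a ∈ xs.takeWhile pz, a = 0 := by
          intro a ha
          simpa [pz] using List.mem_takeWhile_imp ha
        have helen := List.length_dropWhile_le pz xs
        rw [show (0 :: xs).foldl aStep ([], 0) = xs.foldl aStep ([0], 0) by
              simp [aStep]]
        conv_lhs => rw [hzsplit]
        rw [List.foldl_append, aFold_zero_run _ hz'mem, aFold_shift, aFin_append,
            ih _ (by omega)]
        rw [MergeOnes_alt, if_neg (show ¬ pnz (0:Int) = true by decide), List.takeWhile_cons,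
            if_pos (show pz (0:Int) = true by decide), List.dropWhile_cons,
            if_pos (show pz (0:Int) = true by decide)]
        simp
      · -- leading maximal nonzero run r, remainder d
        have hpx : pnz x = true := by simp [pnz, hx]
        have hsplit := (List.takeWhile_append_dropWhile (p := pnz) (l := x :: xs)).symm
        have hrmem : ∀ a ∈ (x :: xs).takeWhile pnz, a ≠ 0 := by
          intro a ha
          simpa [pnz] using List.mem_takeWhile_imp ha
        have hfold1 : (x :: xs).foldl aStep ([], 0) =
            ((x :: xs).dropWhile pnz).foldl aStep ([], ((x :: xs).takeWhile pnz).sum) := by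
          conv_lhs => rw [hsplit]
          rw [List.foldl_append, aFold_nonzero_run _ hrmem]
          norm_num
        have hdlen : ((x :: xs).dropWhile pnz).length ≤ xs.length := by
          rw [List.dropWhile_cons, if_pos hpx]
          exact List.length_dropWhile_le _ _
        cases hd : (x :: xs).dropWhile pnz with
        | nil =>
          rw [hfold1, hd, List.foldl_nil,
              MergeOnes_alt, if_pos hpx, hd, alt_nil]
          by_cases h : ((x :: xs).takeWhile pnz).sum = 0 <;> simp [aFin, pnz, h]
        | cons y d' =>
          have hy : y = 0 := by
            have := dropWhile_head_false hd
            simpa [pnz] using this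
          subst hy
          have hzsplit := (List.takeWhile_append_dropWhile (p := pz) (l := d')).symm
          have hz'mem : ∀ a ∈ d'.takeWhile pz, a = 0 := by
            intro a ha
            simpa [pz] using List.mem_takeWhile_imp ha
          have helen := List.length_dropWhile_le pz d'
          have hd'len : d'.length < xs.length ∨ d'.length + 1 = xs.length := by
            have := hd ▸ hdlen; simp at this; omega
          rw [hfold1, hd, List.foldl_cons,
              show aStep (([] : List Int), ((x :: xs).takeWhile pnz).sum) 0 =
                ((if ((x :: xs).takeWhile pnz).sum ≠ 0
                    then [((x :: xs).takeWhile pnz).sum] else []) ++ [0], 0) by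
                by_cases h : ((x :: xs).takeWhile pnz).sum = 0 <;> simp [aStep, h]]
          conv_lhs => rw [hzsplit]
          rw [List.foldl_append, aFold_zero_run _ hz'mem, aFold_shift, aFin_append,
              ih _ (by omega)]
          have h1 : List.takeWhile pz (0 :: d') = 0 :: List.takeWhile pz d' := by
            rw [List.takeWhile_cons, if_pos (show pz (0:Int) = true by decide)]
          have h2 : List.dropWhile pz (0 :: d') = List.dropWhile pz d' := by
            rw [List.dropWhile_cons, if_pos (show pz (0:Int) = true by decide)]
          rw [MergeOnes_alt, if_pos hpx, hd,
              MergeOnes_alt, if_neg (show ¬ pnz (0:Int) = true by decide), h1, h2]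
          by_cases h : ((x :: xs).takeWhile pnz).sum = 0 <;> simp [pnz, h]

-- ===== VERDICT (by name: the statement is the Claim_ definition above) =====
theorem MergeOnes_spec : Claim_equal_MergeOnes := by
  intro nums _
  unfold Spec_MergeOnes MergeOnes
  exact merge_main nums.length nums le_rfl
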